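-- pv_equiv track=rewrite | github.com/miray-mustafov/Telerik | PythonDSA/interesting_example.py | fake_cubic
-- ===== SOURCE A (Python) =====
-- def fake_cubic(n):  # O(?)
--     count = 0
--     for a in range(n):
--         for b in range(n):
--             if a == b:
--                 for c in range(n):
--                     count += 1
--     return count
-- ===== SOURCE B (Python) =====
-- def fake_cubic(n):
--     # closed form: the inner work runs exactly once per a (when b == a), n times each
--     return max(n, 0) ** 2
-- ===== Notes on version B (the rewrite author's own statement) =====
-- stated objective: faster
-- what changed: Replaced the triple nested loop (which adds 1 exactly n times for each of the n diagonal pairs a==b) by the closed form max(n,0)**2.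
import Mathlib
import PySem

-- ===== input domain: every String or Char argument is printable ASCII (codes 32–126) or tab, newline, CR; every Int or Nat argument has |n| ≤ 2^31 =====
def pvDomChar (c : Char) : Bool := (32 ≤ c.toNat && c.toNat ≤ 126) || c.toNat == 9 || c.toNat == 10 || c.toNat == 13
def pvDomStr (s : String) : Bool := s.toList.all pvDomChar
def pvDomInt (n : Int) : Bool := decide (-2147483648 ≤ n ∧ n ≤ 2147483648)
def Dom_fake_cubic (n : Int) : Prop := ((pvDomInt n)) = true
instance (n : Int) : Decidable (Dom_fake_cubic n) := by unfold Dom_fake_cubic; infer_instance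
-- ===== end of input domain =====

-- B replaces A's triple nested loop by the closed form max(n,0)^2 (O(1) instead of O(n^2)).

-- ===== PORT A =====
def fake_cubic (n : Int) : Int :=
  (PySem.List.pyRange 0 n 1).foldl (fun count a =>
    (PySem.List.pyRange 0 n 1).foldl (fun count b =>
      if a == b then
        (PySem.List.pyRange 0 n 1).foldl (fun count _c => count + 1) count
      else count) count) 0

-- ===== PORT B =====
def fake_cubic_alt (n : Int) : Int := (max n 0) ^ 2

-- ===== PRECONDITION & SPEC =====
def Spec_fake_cubic (n : Int) (out : Int) : Prop := out = fake_cubic_alt n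
instance (n : Int) (out : Int) : Decidable (Spec_fake_cubic n out) := by unfold Spec_fake_cubic; infer_instance

-- ===== CLAIM (what is proved, stated in full; the proofs are below) =====
def Claim_equal_fake_cubic : Prop := ∀ (n : Int), Dom_fake_cubic n → Spec_fake_cubic n (fake_cubic n)

-- ===== LEMMAS AND PROOFS =====

-- innermost c-loop: adds the list length
theorem pv_fold_add_one (l : List Int) (c : Int) :
    l.foldl (fun count _c => count + 1) c = c + l.length := by
  induction l generalizing c with
  | nil => simp
  | cons x xs ih => simp [List.foldl, ih]; omega

-- b-loop: adds k once for every occurrence of a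
theorem pv_fold_if (a k : Int) (l : List Int) (c : Int) :
    l.foldl (fun count b => if a == b then count + k else count) c
      = c + k * (l.count a) := by
  induction l generalizing c with
  | nil => simp
  | cons x xs ih =>
    simp only [List.foldl_cons, List.count_cons]
    by_cases h : a = x
    · subst h
      rw [if_pos (by simp), ih]
      simp
      ring
    · rw [if_neg (by simpa using h), ih]
      have hb : (x == a) = false := by simp [Ne.symm h]
      simp [hb]

-- a-loop: each step adds k
theorem pv_fold_const_add (k : Int) (l : List Int) (c : Int) :
    l.foldl (fun count _a => count + k) c = c + l.length * k := by
  induction l generalizing c with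
  | nil => simp
  | cons x xs ih =>
    simp [List.foldl, ih]
    ring

theorem fake_cubic_eq (n : Int) : fake_cubic n = fake_cubic_alt n := by
  unfold fake_cubic fake_cubic_alt
  have hcongr :
      (PySem.List.pyRange 0 n 1).foldl (fun count a =>
        (PySem.List.pyRange 0 n 1).foldl (fun count b =>
          if a == b then
            (PySem.List.pyRange 0 n 1).foldl (fun count _c => count + 1) count
          else count) count) 0
      = (PySem.List.pyRange 0 n 1).foldl (fun count _a => count + (n : Int)) 0 := by
    apply PySem.List.foldl_congr_mem
    intro acc a ha
    have h1 : ∀ c : Int,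
        (PySem.List.pyRange 0 n 1).foldl (fun count _c => count + 1) c
          = c + (PySem.List.pyRange 0 n 1).length := pv_fold_add_one _
    calc (PySem.List.pyRange 0 n 1).foldl (fun count b =>
          if a == b then
            (PySem.List.pyRange 0 n 1).foldl (fun count _c => count + 1) count
          else count) acc
        = (PySem.List.pyRange 0 n 1).foldl (fun count b =>
            if a == b then count + ((PySem.List.pyRange 0 n 1).length : Int) else count) acc := by
          apply PySem.List.foldl_congr_mem
          intro acc' b _
          by_cases h : (a == b) = true <;> simp [h, h1]
      _ = acc + ((PySem.List.pyRange 0 n 1).length : Int) * ((PySem.List.pyRange 0 n 1).count a) :=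
          pv_fold_if a _ _ _
      _ = acc + n := by
          have hmem : a ∈ PySem.List.pyRange 0 n 1 := ha
          have hcount : (PySem.List.pyRange 0 n 1).count a = 1 :=
            List.count_eq_one_of_mem (PySem.List.nodup_pyRange_one 0 n) hmem
          have hpos : 0 < n := by
            have := (PySem.List.mem_pyRange_one.mp hmem)
            omega
          rw [hcount, PySem.List.length_pyRange_one]
          simp
          omega
  rw [hcongr, pv_fold_const_add, PySem.List.length_pyRange_one]
  by_cases h : n ≤ 0
  · have h1 : (n - 0).toNat = 0 := by omega
    have h2 : max n 0 = 0 := by omega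
    simp [h1, h2]
  · push_neg at h
    have h0 : ((n - 0).toNat : Int) = n := by omega
    rw [h0]
    have : max n 0 = n := by omega
    rw [this]
    ring

-- ===== VERDICT (by name: the statement is the Claim_ definition above) =====
theorem fake_cubic_spec : Claim_equal_fake_cubic := by
  intro n _
  exact fake_cubic_eq n
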